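-- pv_equiv track=rewrite | github.com/looloolalaa/Python-Challenge | PRO_숫자짝꿍.py | solution
-- ===== SOURCE A (Python) =====
-- from collections import Counter
--
-- def solution(X, Y):
--     inter = Counter(X) & Counter(Y)
--     if not inter:
--         return "-1"
--
--     result = ''
--     for num, count in sorted(inter.items(), key=lambda x: -int(x[0])):
--         result += num * count
--     return "0" if all(r == "0" for r in result) else result
-- ===== SOURCE B (Python) =====
-- def solution(X, Y):
--     xs = sorted(X, reverse=True)
--     ys = sorted(Y, reverse=True)
--     out = []
--     i = j = 0
--     while i < len(xs) and j < len(ys):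
--         if xs[i] == ys[j]:
--             out.append(xs[i])
--             i += 1
--             j += 1
--         elif xs[i] > ys[j]:
--             i += 1
--         else:
--             j += 1
--     if not out:
--         return "-1"
--     return "0" if out[0] == "0" else "".join(out)
-- ===== Notes on version B (the rewrite author's own statement) =====
-- stated objective: alternative
-- what changed: B drops the Counter intersection and the key-sort of dict items entirely: it sorts the two strings descending and computes the common multiset with a two-pointer merge over the two sorted lists, which yields the answer already in descending order; the all-zeros case is read off the first merged character.
import Mathlib
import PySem

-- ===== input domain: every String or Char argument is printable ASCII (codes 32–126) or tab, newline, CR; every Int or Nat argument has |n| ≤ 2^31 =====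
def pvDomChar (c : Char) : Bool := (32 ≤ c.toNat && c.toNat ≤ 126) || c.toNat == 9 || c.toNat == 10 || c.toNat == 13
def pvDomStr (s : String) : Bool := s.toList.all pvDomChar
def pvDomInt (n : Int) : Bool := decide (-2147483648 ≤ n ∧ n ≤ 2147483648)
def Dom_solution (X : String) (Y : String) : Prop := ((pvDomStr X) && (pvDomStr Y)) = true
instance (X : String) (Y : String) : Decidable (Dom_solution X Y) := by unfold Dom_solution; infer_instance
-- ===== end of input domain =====

-- B replaces the Counter intersection and item key-sort by sorting both strings descending and a two-pointer merge that emits the common multiset already in order; equal wherever A returns (A raises ValueError when X and Y share a non-digit character — those inputs are excluded by Pre_).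


-- ===== PORT A =====
def solution (X : String) (Y : String) : String :=
  let cx := PySem.Dict.counter X.toList
  let cy := PySem.Dict.counter Y.toList
  -- Counter.__and__: iterate self's items, newcount = min(count, other[elem]), keep if > 0
  let inter := cx.items.foldl (fun (d : PySem.Dict Char Int) p =>
      let otherCount := cy.getD p.1 0
      let newcount := if p.2 < otherCount then p.2 else otherCount
      if 0 < newcount then d.insert p.1 newcount else d) PySem.Dict.empty
  if inter.items = [] then "-1" else
    -- key = -int(x[0]); int() raises ValueError on a non-digit key — Pre_solution excludes those inputs, so the .getD 0 default is never taken
    let sortedItems := PySem.List.sorted inter.items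
        (fun p => -((PySem.Int.ofChars? [p.1]).getD 0)) false
    let result := sortedItems.foldl
        (fun (acc : List Char) p => acc ++ List.replicate p.2.toNat p.1) []
    if result.all (fun r => r == '0') then "0" else String.ofList result

-- ===== PORT B =====
-- the two-pointer while loop of Source B, as structural recursion on the two (sorted) lists
def pvMerge : List Char → List Char → List Char
  | [], _ => []
  | _ :: _, [] => []
  | x :: xs, y :: ys =>
    if x == y then x :: pvMerge xs ys
    else if y < x then pvMerge xs (y :: ys)
    else pvMerge (x :: xs) ys
termination_by xs ys => xs.length + ys.length

def solution_alt (X : String) (Y : String) : String :=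
  let xs := PySem.List.sorted X.toList (fun c => c) true
  let ys := PySem.List.sorted Y.toList (fun c => c) true
  let out := pvMerge xs ys
  if out = [] then "-1"
  else if out[0]? = some '0' then "0" else String.ofList out

-- ===== PRECONDITION & SPEC =====
-- Pre_ excludes exactly the inputs on which A raises ValueError: a character shared by X and Y that is not a decimal digit.
def Pre_solution (X : String) (Y : String) : Prop :=
  (X.toList.all (fun c => !(Y.toList.contains c) || PySem.Chars.isdigit c)) = true
instance (X : String) (Y : String) : Decidable (Pre_solution X Y) := by unfold Pre_solution; infer_instance
def pvWitness_solution : String × String := ("a1120z", "21b1")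

def Spec_solution (X : String) (Y : String) (out : String) : Prop := out = solution_alt X Y
instance (X : String) (Y : String) (out : String) : Decidable (Spec_solution X Y out) := by unfold Spec_solution; infer_instance

-- ===== CLAIM (what is proved, stated in full; the proofs are below) =====
def Claim_equal_solution : Prop := ∀ (X : String) (Y : String), Dom_solution X Y → Pre_solution X Y → Spec_solution X Y (solution X Y)

-- ===== LEMMAS AND PROOFS =====

def pvCnt (xl yl : List Char) (c : Char) : Int :=
  if (xl.count c : Int) < (yl.count c : Int) then (xl.count c : Int) else (yl.count c : Int)

lemma pvCnt_eq (xl yl : List Char) (c : Char) :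
    pvCnt xl yl c = ((min (xl.count c) (yl.count c) : Nat) : Int) := by
  unfold pvCnt; split <;> push_cast <;> omega

def pvG (xl yl : List Char) (c : Char) : Option (Char × Int) :=
  if 0 < pvCnt xl yl c then some (c, pvCnt xl yl c) else none

lemma pvG_eq_some (xl yl : List Char) (c : Char) (p : Char × Int) (h : pvG xl yl c = some p) :
    p.1 = c ∧ p.2 = pvCnt xl yl c ∧ 0 < pvCnt xl yl c := by
  unfold pvG at h
  split at h
  · cases h; exact ⟨rfl, rfl, ‹_›⟩
  · cases h

lemma pvG_pos (xl yl : List Char) (c : Char) (h : 0 < pvCnt xl yl c) :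
    pvG xl yl c = some (c, pvCnt xl yl c) := by
  unfold pvG; rw [if_pos h]

lemma pvG_neg (xl yl : List Char) (c : Char) (h : ¬ 0 < pvCnt xl yl c) :
    pvG xl yl c = none := by
  unfold pvG; rw [if_neg h]

lemma condInsert_items (f : Char → Int) (cs : List Char) :
    ∀ (d : PySem.Dict Char Int), cs.Nodup → (∀ c ∈ cs, d.contains c = false) →
    (cs.foldl (fun d c => if 0 < f c then d.insert c (f c) else d) d).items
      = d.items ++ cs.filterMap (fun c => if 0 < f c then some (c, f c) else none) := by
  induction cs with
  | nil => intro d _ _; simp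
  | cons c cs ih =>
    intro d hnd hfresh
    have hc : d.contains c = false := hfresh c (by simp)
    have hcs : cs.Nodup := (List.nodup_cons.mp hnd).2
    have hcnot : c ∉ cs := (List.nodup_cons.mp hnd).1
    by_cases h : 0 < f c
    · simp only [List.foldl_cons, List.filterMap_cons, h, if_true]
      rw [ih (d.insert c (f c)) hcs ?_]
      · rw [PySem.Dict.items_insert_of_not_contains d (f c) hc]
        simp
      · intro c' hc'
        rw [PySem.Dict.contains_insert]
        have : c' ≠ c := fun he => hcnot (he ▸ hc')
        simp [this, hfresh c' (by simp [hc'])]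
    · simp only [List.foldl_cons, List.filterMap_cons, h, if_false]
      rw [ih d hcs (fun c' hc' => hfresh c' (by simp [hc']))]

lemma isdigit_mem (c : Char) (h : PySem.Chars.isdigit c = true) : c ∈ "9876543210".toList := by
  unfold PySem.Chars.isdigit at h
  simp only [Bool.and_eq_true, decide_eq_true_eq] at h
  obtain ⟨h1, h2⟩ := h
  have b1 : 48 ≤ c.toNat := by rw [Char.le_def] at h1; exact UInt32.le_iff_toNat_le.mp h1
  have b2 : c.toNat ≤ 57 := by rw [Char.le_def] at h2; exact UInt32.le_iff_toNat_le.mp h2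
  have hval : c = Char.ofNat c.toNat := (Char.ofNat_toNat c).symm
  interval_cases h : c.toNat <;> (rw [hval]; decide)

lemma flatMap_filterMap_g (xl yl : List Char) :
    ∀ (l : List Char),
    (l.filterMap (pvG xl yl)).flatMap (fun p => List.replicate p.2.toNat p.1)
      = l.flatMap (fun c => List.replicate (min (xl.count c) (yl.count c)) c) := by
  intro l
  induction l with
  | nil => simp
  | cons c t ih =>
    simp only [List.filterMap_cons, List.flatMap_cons]
    by_cases h : 0 < pvCnt xl yl c
    · rw [pvG_pos xl yl c h]
      simp only [List.flatMap_cons]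
      rw [ih]
      have : (pvCnt xl yl c).toNat = min (xl.count c) (yl.count c) := by
        rw [pvCnt_eq]; omega
      rw [this]
    · rw [pvG_neg xl yl c h]
      rw [ih]
      have : min (xl.count c) (yl.count c) = 0 := by
        have := pvCnt_eq xl yl c; omega
      rw [this]
      simp

-- pairwise of the key on filterMapped digits
lemma pairwise_key_digits (xl yl : List Char) :
    (("9876543210".toList).filterMap (pvG xl yl)).Pairwise
      (fun p q => (fun p : Char × Int => -((PySem.Int.ofChars? [p.1]).getD 0)) p
                < (fun p : Char × Int => -((PySem.Int.ofChars? [p.1]).getD 0)) q) := by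
  rw [List.pairwise_filterMap]
  have base : ("9876543210".toList).Pairwise
      (fun a b => -((PySem.Int.ofChars? [a]).getD 0) < -((PySem.Int.ofChars? [b]).getD 0)) := by
    decide
  refine base.imp_of_mem ?_
  intro a b _ _ hab p hp q hq
  have hpa : p.1 = a := (pvG_eq_some xl yl a p hp).1
  have hqb : q.1 = b := (pvG_eq_some xl yl b q hq).1
  simpa [hpa, hqb] using hab

lemma nodup_filterMap_g (xl yl : List Char) (l : List Char) (h : l.Nodup) :
    (l.filterMap (pvG xl yl)).Nodup := by
  apply h.filterMap
  intro a b p hp hq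
  have ha : p.1 = a := (pvG_eq_some xl yl a p hp).1
  have hb : p.1 = b := (pvG_eq_some xl yl b p hq).1
  rw [← ha, hb]

lemma mem_filterMap_g (xl yl : List Char) (l : List Char) (p : Char × Int) :
    p ∈ l.filterMap (pvG xl yl) ↔ p.1 ∈ l ∧ 0 < pvCnt xl yl p.1 ∧ p.2 = pvCnt xl yl p.1 := by
  rw [List.mem_filterMap]
  constructor
  · rintro ⟨c, hc, hg⟩
    obtain ⟨e1, e2, e3⟩ := pvG_eq_some xl yl c p hg
    rw [e1]
    exact ⟨hc, e3, e2⟩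
  · rintro ⟨h1, h2, h3⟩
    refine ⟨p.1, h1, ?_⟩
    rw [pvG_pos xl yl p.1 h2, ← h3]

lemma cnt_pos_mem (xl yl : List Char) (c : Char) (h : 0 < pvCnt xl yl c) :
    c ∈ xl ∧ c ∈ yl := by
  have := pvCnt_eq xl yl c
  constructor
  · rw [← List.count_pos_iff (l := xl)]; omega
  · rw [← List.count_pos_iff (l := yl)]; omega

lemma inter_items (xl yl : List Char) :
    (List.foldl
      (fun (d : PySem.Dict Char Int) p =>
        if 0 < if p.2 < (PySem.Dict.counter yl).getD p.1 0 then p.2 else (PySem.Dict.counter yl).getD p.1 0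
        then d.insert p.1 (if p.2 < (PySem.Dict.counter yl).getD p.1 0 then p.2 else (PySem.Dict.counter yl).getD p.1 0)
        else d)
      PySem.Dict.empty (PySem.Dict.counter xl).items).items
    = (PySem.Set.ofList xl).filterMap (pvG xl yl) := by
  rw [PySem.Dict.items_counter, List.foldl_map]
  have hbody : (fun (x : PySem.Dict Char Int) (x_1 : Char) =>
      (fun (d : PySem.Dict Char Int) (p : Char × Int) =>
        if 0 < if p.2 < (PySem.Dict.counter yl).getD p.1 0 then p.2 else (PySem.Dict.counter yl).getD p.1 0
        then d.insert p.1 (if p.2 < (PySem.Dict.counter yl).getD p.1 0 then p.2 else (PySem.Dict.counter yl).getD p.1 0)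
        else d) x ((fun k => (k, (xl.count k : Int))) x_1))
      = fun (d : PySem.Dict Char Int) (k : Char) =>
          if 0 < pvCnt xl yl k then d.insert k (pvCnt xl yl k) else d := by
    funext d k
    simp only [PySem.Dict.getD_counter]
    rfl
  rw [hbody]
  rw [condInsert_items (pvCnt xl yl) (PySem.Set.ofList xl) PySem.Dict.empty
    (PySem.Set.nodup_ofList xl) (fun c _ => PySem.Dict.contains_empty c)]
  rw [show (fun c => if 0 < pvCnt xl yl c then some (c, pvCnt xl yl c) else none) = pvG xl yl from rfl]
  simp [PySem.Dict.empty]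

lemma flat_nil_of_filterMap_nil (xl yl : List Char)
    (hn : (PySem.Set.ofList xl).filterMap (pvG xl yl) = []) :
    ("9876543210".toList.flatMap (fun c => List.replicate (min (xl.count c) (yl.count c)) c)) = [] := by
  rw [List.flatMap_eq_nil_iff]
  intro c _
  have hnone := List.filterMap_eq_nil_iff.mp hn
  by_contra hne
  have hmin : 0 < min (xl.count c) (yl.count c) := by
    rcases Nat.eq_zero_or_pos (min (xl.count c) (yl.count c)) with h | h
    · exact absurd (by rw [h]; rfl) hne
    · exact h
  have hpos : 0 < pvCnt xl yl c := by rw [pvCnt_eq]; omega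
  have hmem : c ∈ PySem.Set.ofList xl := by
    rw [PySem.Set.mem_ofList]
    exact (cnt_pos_mem xl yl c hpos).1
  have := hnone c hmem
  rw [pvG_pos xl yl c hpos] at this
  cases this

lemma sorted_items_eq (xl yl : List Char)
    (hpre : ∀ c ∈ xl, c ∈ yl → PySem.Chars.isdigit c = true) :
    PySem.List.sorted ((PySem.Set.ofList xl).filterMap (pvG xl yl))
        (fun p => -((PySem.Int.ofChars? [p.1]).getD 0)) false
      = ("9876543210".toList).filterMap (pvG xl yl) := by
  apply PySem.List.sorted_eq_of_perm_of_pairwise_lt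
  · rw [List.perm_ext_iff_of_nodup
      (nodup_filterMap_g xl yl _ (by decide))
      (nodup_filterMap_g xl yl _ (PySem.Set.nodup_ofList xl))]
    intro p
    rw [mem_filterMap_g, mem_filterMap_g]
    constructor
    · rintro ⟨_, h2, h3⟩
      exact ⟨PySem.Set.mem_ofList xl p.1 |>.mpr (cnt_pos_mem xl yl p.1 h2).1, h2, h3⟩
    · rintro ⟨h1, h2, h3⟩
      obtain ⟨hx, hy⟩ := cnt_pos_mem xl yl p.1 h2
      exact ⟨isdigit_mem p.1 (hpre p.1 hx hy), h2, h3⟩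
  · exact pairwise_key_digits xl yl

lemma flat_ne_nil (xl yl : List Char)
    (hpre : ∀ c ∈ xl, c ∈ yl → PySem.Chars.isdigit c = true)
    (hn : (PySem.Set.ofList xl).filterMap (pvG xl yl) ≠ []) :
    ("9876543210".toList.flatMap (fun c => List.replicate (min (xl.count c) (yl.count c)) c)) ≠ [] := by
  intro hS
  obtain ⟨p, hp⟩ := List.exists_mem_of_ne_nil _ hn
  obtain ⟨h1, h2, _⟩ := (mem_filterMap_g xl yl _ p).mp hp
  obtain ⟨hx, hy⟩ := cnt_pos_mem xl yl p.1 h2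
  have hd : p.1 ∈ "9876543210".toList := isdigit_mem p.1 (hpre p.1 hx hy)
  have := List.flatMap_eq_nil_iff.mp hS p.1 hd
  have hmin : 0 < min (xl.count p.1) (yl.count p.1) := by
    have := pvCnt_eq xl yl p.1; omega
  rw [List.replicate_eq_nil_iff] at this
  omega

lemma all_iff_head (xl yl : List Char)
    (hne : ("9876543210".toList.flatMap (fun c => List.replicate (min (xl.count c) (yl.count c)) c)) ≠ []) :
    ((("9876543210".toList.flatMap (fun c => List.replicate (min (xl.count c) (yl.count c)) c)).all
        (fun r => r == '0')) = true)
      ↔ ("9876543210".toList.flatMap (fun c => List.replicate (min (xl.count c) (yl.count c)) c))[0]?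
          = some '0' := by
  have hsplit : ("9876543210".toList : List Char) = "987654321".toList ++ ['0'] := by decide
  rw [hsplit, List.flatMap_append] at hne ⊢
  simp only [List.flatMap_cons, List.flatMap_nil, List.append_nil] at hne ⊢
  cases hTc : ("987654321".toList.flatMap (fun c => List.replicate (min (xl.count c) (yl.count c)) c)) with
  | nil =>
    rw [hTc] at hne
    simp only [List.nil_append] at hne ⊢
    have hk : min (xl.count '0') (yl.count '0') ≠ 0 := by
      intro h; rw [h] at hne; exact hne rfl
    constructor
    · intro _
      cases hk' : min (xl.count '0') (yl.count '0') with
      | zero => exact absurd hk' hk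
      | succ n => simp [List.replicate_succ]
    · intro _
      simp only [List.all_eq_true]
      intro x hx
      simp [List.eq_of_mem_replicate hx]
  | cons t ts =>
    have ht : t ≠ '0' := by
      have htm : t ∈ ("987654321".toList.flatMap (fun c => List.replicate (min (xl.count c) (yl.count c)) c)) := by
        rw [hTc]; simp
      obtain ⟨c, hc, hr⟩ := List.mem_flatMap.mp htm
      have := List.eq_of_mem_replicate hr
      subst this
      intro h0
      rw [h0] at hc
      revert hc; decide
    simp only [List.cons_append, List.getElem?_cons_zero, List.all_cons, Bool.and_eq_true, beq_iff_eq]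
    constructor
    · rintro ⟨h0, -⟩; exact absurd h0 ht
    · intro h0; cases h0; exact absurd rfl ht

-- ===== B-side lemmas: the two-pointer merge of the two descending-sorted strings IS that same list =====

lemma pvMerge_sublist (xs ys : List Char) : (pvMerge xs ys).Sublist xs := by
  fun_induction pvMerge xs ys with
  | case1 ys => simp
  | case2 x xs => simp
  | case3 x xs y ys hxy ih =>
    exact ih.cons₂ x
  | case4 x xs y ys hxy hlt ih =>
    exact ih.cons x
  | case5 x xs y ys hxy hlt ih =>
    exact ih

lemma pvMerge_count (xs ys : List Char)
    (hx : xs.Pairwise (fun a b => b ≤ a)) (hy : ys.Pairwise (fun a b => b ≤ a)) (c : Char) :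
    (pvMerge xs ys).count c = min (xs.count c) (ys.count c) := by
  fun_induction pvMerge xs ys with
  | case1 ys => simp
  | case2 x xs => simp
  | case3 x xs y ys hxy ih =>
    have hx' : x = y := by simpa using hxy
    subst hx'
    simp only [List.count_cons]
    rw [ih hx.of_cons hy.of_cons]
    by_cases hc : c = x <;> simp [hc]
  | case4 x xs y ys hxy hlt ih =>
    rw [ih hx.of_cons hy]
    by_cases hc : c = x
    · subst hc
      have hnm : c ∉ y :: ys := by
        intro hm
        have hle : c ≤ y := by
          rcases List.mem_cons.mp hm with rfl | hm
          · exact le_refl _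
          · exact List.rel_of_pairwise_cons hy hm
        exact absurd hlt (not_lt.mpr hle)
      have h0 : (y :: ys).count c = 0 := List.count_eq_zero.mpr hnm
      rw [h0]
      simp
    · simp [List.count_cons, Ne.symm hc]
  | case5 x xs y ys hxy hlt ih =>
    rw [ih hx hy.of_cons]
    have hyx : x < y := by
      rcases lt_trichotomy x y with h | h | h
      · exact h
      · exact absurd h (by simpa using hxy)
      · exact absurd h hlt
    by_cases hc : c = y
    · subst hc
      have hnm : c ∉ x :: xs := by
        intro hm
        have hle : c ≤ x := by
          rcases List.mem_cons.mp hm with rfl | hm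
          · exact le_refl _
          · exact List.rel_of_pairwise_cons hx hm
        exact absurd hyx (not_lt.mpr hle)
      have h0 : (x :: xs).count c = 0 := List.count_eq_zero.mpr hnm
      rw [h0]
      simp
    · simp [List.count_cons, Ne.symm hc]

lemma pvFlat_count (f : Char → Nat) (ds : List Char) (hnd : ds.Nodup) (c : Char) :
    (ds.flatMap (fun d => List.replicate (f d) d)).count c = if c ∈ ds then f c else 0 := by
  induction ds with
  | nil => simp
  | cons d t ih =>
    have hdn : d ∉ t := (List.nodup_cons.mp hnd).1
    simp only [List.flatMap_cons, List.count_append, List.count_replicate,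
      ih (List.nodup_cons.mp hnd).2]
    by_cases hc : c = d
    · subst hc
      simp [hdn]
    · simp [hc, Ne.symm hc]

lemma pvFlat_pairwise (f : Char → Nat) (ds : List Char)
    (h : ds.Pairwise (fun a b => b < a)) :
    (ds.flatMap (fun d => List.replicate (f d) d)).Pairwise (fun a b => b ≤ a) := by
  induction ds with
  | nil => simp
  | cons d t ih =>
    simp only [List.flatMap_cons]
    rw [List.pairwise_append]
    refine ⟨List.pairwise_replicate.mpr (Or.inr le_rfl), ih h.of_cons, ?_⟩
    intro a ha b hb
    have ha' : a = d := List.eq_of_mem_replicate ha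
    obtain ⟨d', hd', hb'⟩ := List.mem_flatMap.mp hb
    have hb'' : b = d' := List.eq_of_mem_replicate hb'
    subst ha'; subst hb''
    exact le_of_lt (List.rel_of_pairwise_cons h hd')

lemma desc_eq_of_perm (l1 l2 : List Char) (hp : l1.Perm l2)
    (h1 : l1.Pairwise (fun a b => b ≤ a)) (h2 : l2.Pairwise (fun a b => b ≤ a)) : l1 = l2 := by
  have hpr : l1.reverse.Perm l2.reverse :=
    (l1.reverse_perm).trans (hp.trans l2.reverse_perm.symm)
  have he : l1.reverse = l2.reverse :=
    hpr.eq_of_pairwise (fun a b _ _ hab hba => le_antisymm hab hba)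
      (List.pairwise_reverse.mpr h1) (List.pairwise_reverse.mpr h2)
  exact List.reverse_injective he

lemma merge_eq_flat (xl yl : List Char)
    (hpre : ∀ c ∈ xl, c ∈ yl → PySem.Chars.isdigit c = true) :
    pvMerge (PySem.List.sorted xl (fun c => c) true) (PySem.List.sorted yl (fun c => c) true)
      = "9876543210".toList.flatMap (fun c => List.replicate (min (xl.count c) (yl.count c)) c) := by
  have hxs : (PySem.List.sorted xl (fun c => c) true).Pairwise (fun a b => b ≤ a) :=
    PySem.List.sorted_pairwise_rev xl (fun c => c)
  have hys : (PySem.List.sorted yl (fun c => c) true).Pairwise (fun a b => b ≤ a) :=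
    PySem.List.sorted_pairwise_rev yl (fun c => c)
  apply desc_eq_of_perm
  · rw [List.perm_iff_count]
    intro c
    rw [pvMerge_count _ _ hxs hys c,
      (PySem.List.sorted_perm xl (fun c => c) true).count_eq c,
      (PySem.List.sorted_perm yl (fun c => c) true).count_eq c,
      pvFlat_count _ _ (by decide) c]
    by_cases hd : c ∈ "9876543210".toList
    · rw [if_pos hd]
    · rw [if_neg hd]
      by_cases hx : c ∈ xl
      · by_cases hy : c ∈ yl
        · exact absurd (isdigit_mem c (hpre c hx hy)) hd
        · simp [List.count_eq_zero.mpr hy]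
      · simp [List.count_eq_zero.mpr hx]
  · exact hxs.sublist (pvMerge_sublist _ _)
  · exact pvFlat_pairwise _ _ (by decide)

-- ===== VERDICT (by name: the statement is the Claim_ definition above) =====
theorem solution_spec : Claim_equal_solution := by
  intro X Y _ hpre0
  unfold Pre_solution at hpre0
  rw [List.all_eq_true] at hpre0
  have hpre : ∀ c ∈ X.toList, c ∈ Y.toList → PySem.Chars.isdigit c = true := by
    intro c hx hy
    have h := hpre0 c hx
    simp only [Bool.or_eq_true, Bool.not_eq_true', List.contains_eq_mem,
      decide_eq_false_iff_not] at h
    rcases h with h | h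
    · exact absurd hy h
    · exact h
  unfold Spec_solution
  simp only [solution, solution_alt]
  rw [inter_items X.toList Y.toList]
  rw [merge_eq_flat X.toList Y.toList hpre]
  simp only [PySem.List.foldl_append_eq_flatMap, List.nil_append]
  by_cases hn : (PySem.Set.ofList X.toList).filterMap (pvG X.toList Y.toList) = []
  · rw [if_pos hn, if_pos (flat_nil_of_filterMap_nil X.toList Y.toList hn)]
  · rw [if_neg hn]
    rw [sorted_items_eq X.toList Y.toList (fun c hcx hcy => hpre c hcx hcy)]
    rw [flatMap_filterMap_g X.toList Y.toList]
    have hSne : ("9876543210".toList.flatMap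
        (fun c => List.replicate (min (X.toList.count c) (Y.toList.count c)) c)) ≠ [] :=
      flat_ne_nil X.toList Y.toList (fun c hcx hcy => hpre c hcx hcy) hn
    rw [if_neg hSne]
    by_cases hall : (("9876543210".toList.flatMap
        (fun c => List.replicate (min (X.toList.count c) (Y.toList.count c)) c)).all
          (fun r => r == '0')) = true
    · rw [if_pos hall, if_pos ((all_iff_head X.toList Y.toList hSne).mp hall)]
    · rw [if_neg hall, if_neg (fun hh => hall ((all_iff_head X.toList Y.toList hSne).mpr hh))]
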